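-- pv_equiv track=rewrite | github.com/DanielGarrido06/Trabalho-TCC00355-2024.1 | trabalhothreads.py | nano_para_micro
-- ===== SOURCE A (Python) =====
-- def nano_para_micro(num):
--     # Divide a entrada em nanosegundos (ns) por 1000, convertendo-a em microsegundos (μs).
--     # Também separa a saída em microsegundos em grupos de 3 dígitos, para facilitar a visualização dos resultados.
--     num_str = str(int(num/1000))
--     result = ""
--     for i in range(len(num_str)):
--         if i > 0 and (len(num_str) - i) % 3 == 0:
--             result += ","
--         result += num_str[i]
--     return(result)
-- ===== SOURCE B (Python) =====
-- def _chunks(s):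
--     # split s into groups of three digits counted from the right
--     if len(s) <= 3:
--         return [s]
--     return _chunks(s[:-3]) + [s[-3:]]
--
--
-- def nano_para_micro(num):
--     n = int(num / 1000)
--     body = ",".join(_chunks(str(abs(n))))
--     return "-" + body if n < 0 else body
-- ===== Notes on version B (the rewrite author's own statement) =====
-- stated objective: simpler
-- what changed: B forms the grouped string by recursively chunking the digit string into groups of three from the right and joining with ',' (sign handled separately), instead of A's character-by-character scan with a modulo test on the index.
-- intended difference: For negative inputs whose truncated microsecond value has a digit count that is a multiple of three (num in [-999999,-100000] or [-999999999,-100000000]), A counts the '-' sign as a digit and emits a comma right after it (e.g. '-,123,456'); B returns the intended '-123,456'. — e.g. on nano_para_micro(-100000): A returns "-,100", B returns "-100"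
import Mathlib
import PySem

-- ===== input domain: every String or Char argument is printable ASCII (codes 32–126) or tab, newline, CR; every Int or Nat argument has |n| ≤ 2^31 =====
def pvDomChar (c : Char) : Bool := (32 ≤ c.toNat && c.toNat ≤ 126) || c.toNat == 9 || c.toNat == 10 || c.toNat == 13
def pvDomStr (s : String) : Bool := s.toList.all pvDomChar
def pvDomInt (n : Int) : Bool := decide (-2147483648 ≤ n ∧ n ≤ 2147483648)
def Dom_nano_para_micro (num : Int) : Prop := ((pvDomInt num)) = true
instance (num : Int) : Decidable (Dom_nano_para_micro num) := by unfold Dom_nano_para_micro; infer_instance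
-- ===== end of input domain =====

-- B builds the grouped digit string by right-chunking and joining instead of A's per-character
-- scan with a modulo test; on negative values whose digit count is a multiple of three, A emits a
-- stray comma after the '-' sign and B returns the intended string (see D_ below).

-- ===== PORT A =====
def nano_para_micro (num : Int) : String :=
  -- num_str = str(int(num/1000)); int(num/1000) is truncation toward zero, exact on |num| ≤ 2^31
  let numStr := PySem.Int.toChars (PySem.Int.truncdiv num 1000)
  -- for i in range(len(num_str)): if i > 0 and (len(num_str) - i) % 3 == 0: result += ","; result += num_str[i]
  String.ofList ((PySem.List.enumerate numStr).foldl
    (fun result ic =>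
      (if 0 < ic.1 ∧ PySem.Int.mod ((numStr.length : Int) - ic.1) 3 = 0 then result ++ [','] else result)
        ++ [ic.2]) [])

-- ===== PORT B =====
-- _chunks(s): groups of three from the right (s[:-3] and s[-3:] via PySem slices)
def pvChunks (s : List Char) : List (List Char) :=
  if _h : s.length ≤ 3 then [s]
  else pvChunks (PySem.List.slice s none (some (-3))) ++ [PySem.List.slice s (some (-3)) none]
termination_by s.length
decreasing_by
  rw [PySem.List.slice_to_neg_ofNat s 3 (by omega)]
  simp only [List.length_take]
  omega

def nano_para_micro_alt (num : Int) : String :=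
  let n := PySem.Int.truncdiv num 1000
  -- body = ",".join(_chunks(str(abs(n))))
  let body := PySem.Chars.join [','] (pvChunks (PySem.Int.toChars |n|))
  if n < 0 then String.ofList ('-' :: body) else String.ofList body

-- ===== PRECONDITION & SPEC =====
-- For negative inputs whose truncated microsecond value has a digit count that is a multiple of three
-- (num in [-999999,-100000] or [-999999999,-100000000]), A counts the '-' sign as a digit and
-- emits a comma right after it (e.g. '-,123,456'); B returns the intended '-123,456'.
def D_nano_para_micro (num : Int) : Prop :=
  (-999999 ≤ num ∧ num ≤ -100000) ∨ (-999999999 ≤ num ∧ num ≤ -100000000)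
instance (num : Int) : Decidable (D_nano_para_micro num) := by unfold D_nano_para_micro; infer_instance

def Spec_nano_para_micro (num : Int) (out : String) : Prop := ¬ D_nano_para_micro num → out = nano_para_micro_alt num
instance (num : Int) (out : String) : Decidable (Spec_nano_para_micro num out) := by unfold Spec_nano_para_micro; infer_instance

def pvDiffWitness_nano_para_micro : Int := (-100000)
def pvDiffWitnessOut_nano_para_micro : String × String := ("-,100", "-100")

-- ===== CLAIM (what is proved, stated in full; the proofs are below) =====
def Claim_unchanged_nano_para_micro : Prop := ∀ (num : Int), Dom_nano_para_micro num → Spec_nano_para_micro num (nano_para_micro num)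
def Claim_changed_nano_para_micro : Prop := Dom_nano_para_micro (pvDiffWitness_nano_para_micro) ∧ D_nano_para_micro (pvDiffWitness_nano_para_micro) ∧ nano_para_micro (pvDiffWitness_nano_para_micro) = pvDiffWitnessOut_nano_para_micro.1 ∧ nano_para_micro_alt (pvDiffWitness_nano_para_micro) = pvDiffWitnessOut_nano_para_micro.2 ∧ pvDiffWitnessOut_nano_para_micro.1 ≠ pvDiffWitnessOut_nano_para_micro.2
def Claim_exact_nano_para_micro : Prop := ∀ (num : Int), Dom_nano_para_micro num → D_nano_para_micro num → nano_para_micro num ≠ nano_para_micro_alt num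

-- ===== LEMMAS AND PROOFS =====

-- A's scan, written structurally: k is the total length, i the current index.
def pvAF (k : Int) : Int → List Char → List Char
  | _, [] => []
  | i, c :: cs => (if 0 < i ∧ (k - i) % 3 = 0 then [','] else []) ++ c :: pvAF k (i + 1) cs

theorem pvAF_foldl (k : Int) (cs : List Char) (i : Int) (acc : List Char) :
    (PySem.List.enumerate cs i).foldl
      (fun result ic =>
        (if 0 < ic.1 ∧ PySem.Int.mod (k - ic.1) 3 = 0 then result ++ [','] else result)
          ++ [ic.2]) acc = acc ++ pvAF k i cs := by
  induction cs generalizing i acc with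
  | nil => simp [pvAF, PySem.List.enumerate]
  | cons c cs ih =>
    rw [PySem.List.enumerate_cons, List.foldl_cons, ih]
    simp only [PySem.Int.mod_eq_emod_of_pos (show (0:Int) < 3 by norm_num), pvAF]
    split_ifs with hc <;> simp

theorem pvAF_append (k : Int) (l t : List Char) (i : Int) :
    pvAF k i (l ++ t) = pvAF k i l ++ pvAF k (i + l.length) t := by
  induction l generalizing i with
  | nil => simp [pvAF]
  | cons c l ih =>
    simp only [List.cons_append, pvAF, ih, List.length_cons]
    have : i + 1 + (l.length : Int) = i + ((l.length : Int) + 1) := by ring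
    rw [this]
    push_cast
    ring_nf
    simp

theorem pvChunks_ne_nil (s : List Char) : pvChunks s ≠ [] := by
  unfold pvChunks
  split <;> simp

theorem pvJoin_snoc (xs : List (List Char)) (t : List Char) (h : xs ≠ []) :
    PySem.Chars.join [','] (xs ++ [t]) = PySem.Chars.join [','] xs ++ ',' :: t := by
  induction xs with
  | nil => exact absurd rfl h
  | cons p rest ih =>
    cases rest with
    | nil => simp [PySem.Chars.join_singleton, PySem.Chars.join_cons_cons]
    | cons q rest' =>
      rw [List.cons_append, PySem.Chars.join_cons_cons]
      rw [show (q :: rest') ++ [t] = q :: (rest' ++ [t]) from rfl] at *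
      rw [PySem.Chars.join_cons_cons, ih (by simp)]
      simp

-- Main characterisation: A's scan over cs, started at index i with total length k
-- congruent to cs.length mod 3, produces the grouped-and-joined string, with a
-- leading comma exactly when i > 0 and cs.length is a positive multiple of 3.
theorem pvAF_chunks (N : Nat) : ∀ (cs : List Char), cs.length = N → ∀ (k i : Int), 0 ≤ i →
    (k - i) % 3 = (cs.length : Int) % 3 →
    pvAF k i cs = (if 0 < i ∧ (cs.length : Int) % 3 = 0 ∧ cs ≠ [] then [','] else [])
      ++ PySem.Chars.join [','] (pvChunks cs) := by
  induction N using Nat.strong_induction_on with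
  | _ N ih =>
    intro cs hN k i hi hcong
    by_cases hle : cs.length ≤ 3
    · -- small case: at most 3 characters, a single chunk, no internal comma
      rw [pvChunks, dif_pos hle]
      rw [PySem.Chars.join_singleton]
      match cs, hle with
      | [], _ => simp [pvAF]
      | [a], _ =>
        have h0 : (k - i) % 3 = 1 := by simpa using hcong
        simp only [pvAF]
        rw [if_neg (by omega : ¬(0 < i ∧ (k - i) % 3 = 0)), if_neg (by norm_num)]
      | [a, b], _ =>
        have h0 : (k - i) % 3 = 2 := by simpa using hcong
        simp only [pvAF]
        rw [if_neg (by omega : ¬(0 < i ∧ (k - i) % 3 = 0)),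
            if_neg (by omega : ¬(0 < i + 1 ∧ (k - (i + 1)) % 3 = 0)), if_neg (by norm_num)]
        simp
      | [a, b, c], _ =>
        have h0 : (k - i) % 3 = 0 := by simpa using hcong
        simp only [pvAF]
        rw [if_neg (by omega : ¬(0 < i + 1 ∧ (k - (i + 1)) % 3 = 0)),
            if_neg (by omega : ¬(0 < i + 1 + 1 ∧ (k - (i + 1 + 1)) % 3 = 0))]
        by_cases hip : 0 < i
        · rw [if_pos ⟨hip, h0⟩, if_pos (by simp; exact hip)]
          simp
        · rw [if_neg (by omega), if_neg (by simp; omega)]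
          simp
    · -- cs = l ++ t with |t| = 3; the comma before t is the separator
      rw [Nat.not_le] at hle
      set m := cs.length - 3 with hm
      have hm1 : 1 ≤ m := by omega
      set l := cs.take m with hl
      set t := cs.drop m with ht
      have hlen_l : l.length = m := by simp [hl]; omega
      have hlen_t : t.length = 3 := by simp [ht]; omega
      have hsplit : cs = l ++ t := (List.take_append_drop m cs).symm
      have hchunks : pvChunks cs = pvChunks l ++ [t] := by
        rw [pvChunks, dif_neg (by omega)]
        rw [PySem.List.slice_to_neg_ofNat cs 3 (by omega),
            PySem.List.slice_from_neg_ofNat cs 3 (by omega)]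
      have hIHl := ih m (by omega) l hlen_l k i hi (by
        rw [hlen_l]
        have : (cs.length : Int) = (m : Int) + 3 := by omega
        omega)
      have hIHt := ih 3 (by omega) t hlen_t k (i + (m : Int)) (by omega) (by
        rw [hlen_t]
        have : (cs.length : Int) = (m : Int) + 3 := by omega
        omega)
      have hlne : l ≠ [] := by
        intro h; rw [h] at hlen_l; simp at hlen_l; omega
      have htne : t ≠ [] := by
        intro h; rw [h] at hlen_t; simp at hlen_t
      rw [if_pos ⟨by omega, by rw [hlen_t]; norm_num, htne⟩] at hIHt
      conv_lhs => rw [hsplit]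
      rw [pvAF_append, hIHl, hlen_l, hIHt, hchunks,
          pvJoin_snoc _ _ (pvChunks_ne_nil l)]
      have hcsne : cs ≠ [] := by intro h; rw [h] at hle; simp at hle
      have hmod : ((m : Int)) % 3 = (cs.length : Int) % 3 := by
        have : (cs.length : Int) = (m : Int) + 3 := by omega
        omega
      have hct : pvChunks t = [t] := by rw [pvChunks]; exact dif_pos (by omega)
      rw [hct, PySem.Chars.join_singleton, ← hmod]
      simp only [hlne, hcsne, ne_eq, not_false_eq_true, and_true]
      split_ifs <;> simp

-- exact decimal length of Nat.toDigits via `Nat.digits`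
theorem pvToDigitsCore_length (f : Nat) : ∀ (n : Nat) (l : List Char), n < f →
    (Nat.toDigitsCore 10 f n l).length = (if n = 0 then 1 else (Nat.digits 10 n).length) + l.length := by
  induction f with
  | zero => intro n l h; omega
  | succ f ihf =>
    intro n l h
    rw [Nat.toDigitsCore]
    by_cases h0 : n / 10 = 0
    · rw [if_pos h0]
      by_cases hn : n = 0
      · simp [hn]; omega
      · have hntn : n < 10 := by omega
        rw [if_neg hn, Nat.digits_def' (by norm_num : 1 < 10) (by omega), Nat.div_eq_of_lt hntn]
        simp
        omega
    · rw [if_neg h0]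
      have hn : n ≠ 0 := by intro h; simp [h] at h0
      have hlt : n / 10 < f := by
        have : n / 10 < n := Nat.div_lt_self (by omega) (by norm_num)
        omega
      rw [ihf (n / 10) _ hlt, if_neg h0, if_neg hn]
      have hdig : Nat.digits 10 n = n % 10 :: Nat.digits 10 (n / 10) := Nat.digits_def' (by norm_num : 1 < 10) (by omega)
      rw [hdig]
      simp
      omega

theorem pvToDigits_length (n : Nat) :
    (Nat.toDigits 10 n).length = if n = 0 then 1 else (Nat.digits 10 n).length := by
  rw [Nat.toDigits, pvToDigitsCore_length (n + 1) n [] (by omega)]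
  simp

theorem pvPow10_lt {a b : Nat} (h : 10 ^ a < 10 ^ b) : a < b :=
  (Nat.pow_lt_pow_iff_right (by norm_num)).mp h

theorem pvDigitsLen_range (m k : Nat) (h1 : 10 ^ k ≤ m) (h2 : m < 10 ^ (k + 1)) :
    (Nat.digits 10 m).length = k + 1 := by
  have hm : m ≠ 0 := by
    have : 1 ≤ 10 ^ k := Nat.one_le_pow _ _ (by norm_num)
    omega
  have hu := Nat.base_pow_length_digits_le 10 m (by norm_num) hm
  have hl := @Nat.lt_base_pow_length_digits 10 m (by norm_num)
  have h3 : k < (Nat.digits 10 m).length := pvPow10_lt (lt_of_le_of_lt h1 hl)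
  have h4 : (Nat.digits 10 m).length < k + 2 := by
    apply pvPow10_lt
    calc 10 ^ (Nat.digits 10 m).length ≤ 10 * m := hu
      _ < 10 * 10 ^ (k + 1) := by omega
      _ = 10 ^ (k + 2) := by ring
  omega

-- the digit string of |n| (n = truncated μs value) for negative num
theorem pvToChars_neg (n : Int) (hn : n < 0) :
    PySem.Int.toChars n = '-' :: Nat.toDigits 10 n.natAbs ∧
    PySem.Int.toChars |n| = Nat.toDigits 10 n.natAbs := by
  constructor
  · simp [PySem.Int.toChars, hn]
  · have hx : (|n|).toNat = n.natAbs := by rw [Int.abs_eq_natAbs]; omega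
    calc PySem.Int.toChars |n| = Nat.toDigits 10 (|n|).toNat := by
            simp [PySem.Int.toChars, show ¬ (|n| < 0) from not_lt.mpr (abs_nonneg n)]
      _ = Nat.toDigits 10 n.natAbs := by rw [hx]

theorem pvToChars_nonneg (n : Int) (hn : 0 ≤ n) : PySem.Int.toChars |n| = PySem.Int.toChars n := by
  rw [abs_of_nonneg hn]

-- the truncated quotient as a Euclidean quotient of |num|, omega-friendly
theorem pvTdiv_neg (num : Int) (h : num ≤ 0) :
    PySem.Int.truncdiv num 1000 = -((-num) / 1000) := by
  have h1 : PySem.Int.truncdiv num 1000 = -(Int.tdiv (-num) 1000) := by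
    show Int.tdiv num 1000 = -(Int.tdiv (-num) 1000)
    rw [← Int.neg_tdiv]
    norm_num
  rw [h1, Int.tdiv_eq_ediv_of_nonneg (show (0:Int) ≤ -num by omega)]

theorem pvTdiv_nonneg (num : Int) (h : 0 ≤ num) : 0 ≤ PySem.Int.truncdiv num 1000 := by
  have h1 : PySem.Int.truncdiv num 1000 = num / 1000 := Int.tdiv_eq_ediv_of_nonneg h
  rw [h1]
  positivity

-- port A, written through pvAF
theorem pvA_eq (num : Int) :
    nano_para_micro num =
      String.ofList (pvAF ((PySem.Int.toChars (PySem.Int.truncdiv num 1000)).length : Int) 0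
        (PySem.Int.toChars (PySem.Int.truncdiv num 1000))) := by
  simp only [nano_para_micro, pvAF_foldl, List.nil_append]

theorem pvDigitsLen_mod3 (m : Nat)
    (hr : (1 ≤ m ∧ m ≤ 99) ∨ (1000 ≤ m ∧ m ≤ 99999) ∨ (1000000 ≤ m ∧ m ≤ 2147483)) :
    (Nat.digits 10 m).length % 3 ≠ 0 := by
  rcases hr with ⟨h1, h2⟩ | ⟨h1, h2⟩ | ⟨h1, h2⟩
  · rcases Nat.lt_or_ge m 10 with h | h
    · rw [pvDigitsLen_range m 0 (by norm_num; omega) (by norm_num; omega)]; omega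
    · rw [pvDigitsLen_range m 1 (by norm_num; omega) (by norm_num; omega)]; omega
  · rcases Nat.lt_or_ge m 10000 with h | h
    · rw [pvDigitsLen_range m 3 (by norm_num; omega) (by norm_num; omega)]; omega
    · rw [pvDigitsLen_range m 4 (by norm_num; omega) (by norm_num; omega)]; omega
  · rw [pvDigitsLen_range m 6 (by norm_num; omega) (by norm_num; omega)]; omega

theorem pvDigitsLen_mod3_D (m : Nat)
    (hr : (100 ≤ m ∧ m ≤ 999) ∨ (100000 ≤ m ∧ m ≤ 999999)) :
    (Nat.digits 10 m).length % 3 = 0 := by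
  rcases hr with ⟨h1, h2⟩ | ⟨h1, h2⟩
  · rw [pvDigitsLen_range m 2 (by norm_num; omega) (by norm_num; omega)]
  · rw [pvDigitsLen_range m 5 (by norm_num; omega) (by norm_num; omega)]

-- the scan over '-' :: ds, one step unfolded
theorem pvAF_neg_step (ds : List Char) :
    pvAF ((('-' :: ds).length : Int)) 0 ('-' :: ds)
      = '-' :: pvAF (((ds.length : Int)) + 1) 1 ds := by
  simp only [pvAF, List.length_cons]
  rw [if_neg (by omega)]
  push_cast
  norm_num

-- the negative case, packaged for both the unchanged and the tight theorem
theorem pvNeg_shape (num : Int) (hn : PySem.Int.truncdiv num 1000 < 0) :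
    nano_para_micro num
      = String.ofList ('-' ::
          ((if ((Nat.toDigits 10 (PySem.Int.truncdiv num 1000).natAbs).length) % 3 = 0 then [','] else [])
            ++ PySem.Chars.join [',']
                (pvChunks (Nat.toDigits 10 (PySem.Int.truncdiv num 1000).natAbs)))) ∧
    nano_para_micro_alt num
      = String.ofList ('-' ::
          PySem.Chars.join [','] (pvChunks (Nat.toDigits 10 (PySem.Int.truncdiv num 1000).natAbs))) := by
  obtain ⟨hA1, hA2⟩ := pvToChars_neg _ hn
  set nn := PySem.Int.truncdiv num 1000 with hdefn
  set ds := Nat.toDigits 10 nn.natAbs with hds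
  have hdsl : ds.length = (Nat.digits 10 nn.natAbs).length := by
    rw [hds, pvToDigits_length, if_neg (by omega)]
  have hdsne : ds ≠ [] := by
    intro h
    rw [h] at hdsl
    simp only [List.length_nil] at hdsl
    have h2 : Nat.digits 10 nn.natAbs ≠ [] := Nat.digits_ne_nil_iff_ne_zero.mpr (by omega)
    exact h2 (List.length_eq_zero_iff.mp hdsl.symm)
  have hch := pvAF_chunks ds.length ds rfl ((ds.length : Int) + 1) 1 (by omega) (by omega)
  constructor
  · rw [pvA_eq, hA1, pvAF_neg_step, hch]
    congr 2
    by_cases h3 : (ds.length) % 3 = 0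
    · rw [if_pos ⟨by omega, by omega, hdsne⟩, if_pos h3]
    · rw [if_neg (by push_cast; omega), if_neg h3]
  · unfold nano_para_micro_alt
    rw [if_pos hn, hA2]

-- ===== VERDICT (by name: the statement is the Claim_ definition above) =====
theorem nano_para_micro_spec : Claim_unchanged_nano_para_micro := by
  intro num hdom hnd
  show nano_para_micro num = nano_para_micro_alt num
  have hd : -2147483648 ≤ num ∧ num ≤ 2147483648 := by
    have h1 := hdom
    unfold Dom_nano_para_micro pvDomInt at h1
    simpa using h1
  have hcases : 0 ≤ PySem.Int.truncdiv num 1000 ∨ PySem.Int.truncdiv num 1000 < 0 := by omega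
  rcases hcases with hn | hn
  · -- nonnegative value: no sign character, both sides are the grouped digits
    rw [pvA_eq]
    unfold nano_para_micro_alt
    rw [if_neg (by omega), pvToChars_nonneg _ hn]
    have hch := pvAF_chunks (PySem.Int.toChars (PySem.Int.truncdiv num 1000)).length
      (PySem.Int.toChars (PySem.Int.truncdiv num 1000)) rfl
      ((PySem.Int.toChars (PySem.Int.truncdiv num 1000)).length : Int) 0 le_rfl (by omega)
    rw [hch, if_neg (by omega)]
    simp
  · -- negative value outside D_: odd digit-count, so no comma after the sign
    obtain ⟨hA, hB⟩ := pvNeg_shape num hn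
    rw [hA, hB]
    have hnum : num < 0 := by
      by_contra h
      exact absurd (pvTdiv_nonneg num (by omega)) (by omega)
    have htd := pvTdiv_neg num (by omega)
    have hm1 : 1 ≤ (PySem.Int.truncdiv num 1000).natAbs := by omega
    have hmb : (PySem.Int.truncdiv num 1000).natAbs ≤ 2147483 := by omega
    have hnotD : ¬ ((100 ≤ (PySem.Int.truncdiv num 1000).natAbs ∧ (PySem.Int.truncdiv num 1000).natAbs ≤ 999)
        ∨ (100000 ≤ (PySem.Int.truncdiv num 1000).natAbs ∧ (PySem.Int.truncdiv num 1000).natAbs ≤ 999999)) := by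
      unfold D_nano_para_micro at hnd
      omega
    have hdsl : (Nat.toDigits 10 (PySem.Int.truncdiv num 1000).natAbs).length
        = (Nat.digits 10 (PySem.Int.truncdiv num 1000).natAbs).length := by
      rw [pvToDigits_length, if_neg (by omega)]
    rw [if_neg (by rw [hdsl]; exact pvDigitsLen_mod3 _ (by omega))]
    simp

theorem nano_para_micro_changed : Claim_changed_nano_para_micro := by
  unfold Claim_changed_nano_para_micro
  refine ⟨by decide, by decide, ?_, ?_, by decide⟩
  · rw [pvA_eq,
      show PySem.Int.toChars (PySem.Int.truncdiv pvDiffWitness_nano_para_micro 1000)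
        = ['-', '1', '0', '0'] from by decide]
    decide
  · have h1 : PySem.Int.toChars |PySem.Int.truncdiv pvDiffWitness_nano_para_micro 1000|
        = ['1', '0', '0'] := by decide
    have h2 : pvChunks ['1', '0', '0'] = [['1', '0', '0']] := by
      rw [pvChunks]; exact dif_pos (by norm_num)
    simp only [nano_para_micro_alt, h1, h2, PySem.Chars.join_singleton]
    rw [if_pos (by decide)]
    decide

theorem nano_para_micro_tight : Claim_exact_nano_para_micro := by
  intro num hdom hD heq
  have hDn : (-999999 ≤ num ∧ num ≤ -100000) ∨ (-999999999 ≤ num ∧ num ≤ -100000000) := hD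
  have htd := pvTdiv_neg num (by omega)
  have hn : PySem.Int.truncdiv num 1000 < 0 := by omega
  obtain ⟨hA, hB⟩ := pvNeg_shape num hn
  have hinD : (100 ≤ (PySem.Int.truncdiv num 1000).natAbs ∧ (PySem.Int.truncdiv num 1000).natAbs ≤ 999)
      ∨ (100000 ≤ (PySem.Int.truncdiv num 1000).natAbs ∧ (PySem.Int.truncdiv num 1000).natAbs ≤ 999999) := by
    omega
  have hdsl : (Nat.toDigits 10 (PySem.Int.truncdiv num 1000).natAbs).length
      = (Nat.digits 10 (PySem.Int.truncdiv num 1000).natAbs).length := by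
    rw [pvToDigits_length, if_neg (by omega)]
  rw [hA, hB, if_pos (by rw [hdsl]; exact pvDigitsLen_mod3_D _ hinD)] at heq
  have hlists := congrArg String.toList heq
  simp only [String.toList_ofList] at hlists
  have hlen := congrArg List.length hlists
  simp at hlen
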